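-- pv_equiv track=rewrite | github.com/ckoons/BubbleSpacetimeTheory | play/toy_431_complementary_damage.py | bfs_component
-- ===== SOURCE A (Python) =====
-- from collections import defaultdict, deque, Counter
--
-- def bfs_component(adj_list, start, vertex_set):
--     if start not in vertex_set: return set()
--     visited = set()
--     queue = deque([start])
--     while queue:
--         u = queue.popleft()
--         if u in visited: continue
--         visited.add(u)
--         for w in adj_list.get(u, []):
--             if w not in visited and w in vertex_set:
--                 queue.append(w)
--     return visited
-- ===== SOURCE B (Python) =====
-- def bfs_component(adj_list, start, vertex_set):
--     if start not in vertex_set: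
--         return set()
--     members = {start}
--     comp = [start]  # insertion order, so each rescan pass is deterministic
--     changed = True
--     while changed:
--         changed = False
--         for u in list(comp):
--             for w in adj_list.get(u, []):
--                 if w in vertex_set and w not in members:
--                     members.add(w)
--                     comp.append(w)
--                     changed = True
--     return members
-- ===== Notes on version B (the rewrite author's own statement) =====
-- stated objective: alternative
-- what changed: Replaces the FIFO-queue BFS by a naive fixed-point (closure) iteration with no queue or frontier at all: repeatedly rescan the entire current component, adding every allowed neighbour, until a full pass adds nothing.
import Mathlib
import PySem

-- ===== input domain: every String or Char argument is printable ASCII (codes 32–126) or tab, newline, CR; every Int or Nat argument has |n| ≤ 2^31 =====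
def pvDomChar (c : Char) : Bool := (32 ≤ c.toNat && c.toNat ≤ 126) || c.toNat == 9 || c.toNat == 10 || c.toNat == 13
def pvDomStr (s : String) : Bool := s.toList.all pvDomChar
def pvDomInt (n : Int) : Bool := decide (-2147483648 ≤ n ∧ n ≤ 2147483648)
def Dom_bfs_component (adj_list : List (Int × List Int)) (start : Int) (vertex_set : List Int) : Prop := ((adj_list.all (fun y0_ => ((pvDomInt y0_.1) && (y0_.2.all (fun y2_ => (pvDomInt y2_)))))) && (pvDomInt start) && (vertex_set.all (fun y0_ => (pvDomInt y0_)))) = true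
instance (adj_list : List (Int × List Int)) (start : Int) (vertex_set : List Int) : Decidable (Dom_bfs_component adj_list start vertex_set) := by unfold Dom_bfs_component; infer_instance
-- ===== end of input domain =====

-- B replaces A's FIFO-queue BFS by a naive fixed-point iteration with no queue or frontier:
-- repeatedly rescan the whole current component adding allowed neighbours until a pass adds
-- nothing; same returned set (objective: alternative).
-- Both programs return a Python set; the ports return its distinct elements in first-insertion order.

-- ===== termination lemmas cited by the ports' decreasing_by (stated before the ports for that reason) =====
lemma pv_filter_append_lt (vs visited : List Int) (u : Int)
    (hu : u ∈ vs) (hnv : u ∉ visited) :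
    ((List.dedup vs).filter (fun x => !(List.contains (visited ++ [u]) x))).length
      < ((List.dedup vs).filter (fun x => !(List.contains visited x))).length := by
  have hsub : List.Sublist
      ((List.dedup vs).filter (fun x => !(List.contains (visited ++ [u]) x)))
      ((List.dedup vs).filter (fun x => !(List.contains visited x))) := by
    apply List.monotone_filter_right
    intro x hx
    simp only [Bool.not_eq_eq_eq_not, Bool.not_true, List.contains_eq_mem,
      List.mem_append, decide_eq_false_iff_not] at hx ⊢
    tauto
  have hmem : u ∈ (List.dedup vs).filter (fun x => !(List.contains visited x)) := by
    simp only [List.mem_filter, List.mem_dedup, Bool.not_eq_eq_eq_not, Bool.not_true,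
      List.contains_eq_mem, decide_eq_false_iff_not]
    exact ⟨hu, hnv⟩
  have hnmem : u ∉ (List.dedup vs).filter (fun x => !(List.contains (visited ++ [u]) x)) := by
    simp
  refine Nat.lt_of_le_of_ne hsub.length_le (fun heq => hnmem ?_)
  rw [(List.Sublist.length_eq hsub).mp heq]
  exact hmem

lemma pv_mem_foldl_append_if (p : Int → Bool) (l : List Int) :
    ∀ (acc : List Int) (x : Int),
      x ∈ l.foldl (fun qq w => if p w then qq ++ [w] else qq) acc → x ∈ acc ∨ p x = true := by
  induction l with
  | nil => intro acc x hx; exact Or.inl hx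
  | cons w l ih =>
    intro acc x hx
    simp only [List.foldl_cons] at hx
    by_cases hp : p w = true
    · rw [if_pos hp] at hx
      rcases ih _ _ hx with h | h
      · rcases List.mem_append.mp h with h | h
        · exact Or.inl h
        · exact Or.inr (List.mem_singleton.mp h ▸ hp)
      · exact Or.inr h
    · rw [if_neg hp] at hx
      exact ih _ _ hx

-- first-discovery list of one node's neighbours: the new elements one inner loop appends
def pvFresh (vertex_set : List Int) : List Int → List Int → List Int
  | [], _ => []
  | w :: l, comp =>
    if List.contains vertex_set w && !(List.contains comp w) then
      w :: pvFresh vertex_set l (comp ++ [w])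
    else pvFresh vertex_set l comp

-- new elements appended by scanning a whole list of nodes
def pvFreshAll (adj_list : List (Int × List Int)) (vertex_set : List Int) : List Int → List Int → List Int
  | [], _ => []
  | u :: f, comp =>
    pvFresh vertex_set ((PySem.Dict.mk adj_list).getD u []) comp
      ++ pvFreshAll adj_list vertex_set f
           (comp ++ pvFresh vertex_set ((PySem.Dict.mk adj_list).getD u []) comp)

lemma pv_fresh_mem (vs : List Int) (l : List Int) : ∀ (c : List Int) (x : Int),
    x ∈ pvFresh vs l c → x ∈ vs ∧ x ∉ c := by
  induction l with
  | nil => intro c x hx; simp [pvFresh] at hx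
  | cons w l ih =>
    intro c x hx
    unfold pvFresh at hx
    split at hx
    · next hw =>
      have hw' : w ∈ vs ∧ w ∉ c := by simpa using hw
      rcases List.mem_cons.mp hx with rfl | hx'
      · exact hw'
      · have := ih _ _ hx'
        exact ⟨this.1, fun hc => this.2 (by simp [hc])⟩
    · exact ih _ _ hx

lemma pv_fresh_nodup (vs : List Int) (l : List Int) : ∀ (c : List Int), (pvFresh vs l c).Nodup := by
  induction l with
  | nil => intro c; simp [pvFresh]
  | cons w l ih =>
    intro c
    unfold pvFresh
    split
    · refine List.nodup_cons.mpr ⟨fun hmem => ?_, ih _⟩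
      exact (pv_fresh_mem _ _ _ _ hmem).2 (by simp)
    · exact ih _

lemma pv_freshAll_mem (adj_list : List (Int × List Int)) (vs : List Int) (f : List Int) :
    ∀ (c : List Int) (x : Int), x ∈ pvFreshAll adj_list vs f c → x ∈ vs ∧ x ∉ c := by
  induction f with
  | nil => intro c x hx; simp [pvFreshAll] at hx
  | cons u f ih =>
    intro c x hx
    unfold pvFreshAll at hx
    rcases List.mem_append.mp hx with hx' | hx'
    · exact pv_fresh_mem _ _ _ _ hx'
    · have := ih _ _ hx'
      exact ⟨this.1, fun hc => this.2 (by simp [hc])⟩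

lemma pv_freshAll_nodup (adj_list : List (Int × List Int)) (vs : List Int) (f : List Int) :
    ∀ (c : List Int), (pvFreshAll adj_list vs f c).Nodup := by
  induction f with
  | nil => intro c; simp [pvFreshAll]
  | cons u f ih =>
    intro c
    unfold pvFreshAll
    refine List.Nodup.append (pv_fresh_nodup _ _ _) (ih _) ?_
    intro x hx1 hx2
    exact (pv_freshAll_mem adj_list vs f _ x hx2).2 (by simp [hx1])

lemma pv_measure_le (vs : List Int) (Δ : List Int) : ∀ (comp : List Int),
    (∀ x ∈ Δ, x ∈ vs ∧ x ∉ comp) → Δ.Nodup →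
    ((List.dedup vs).filter (fun x => !(List.contains (comp ++ Δ) x))).length + Δ.length
      ≤ ((List.dedup vs).filter (fun x => !(List.contains comp x))).length := by
  induction Δ with
  | nil => intro comp _ _; simp
  | cons x Δ ih =>
    intro comp hmem hnd
    have hx := hmem x List.mem_cons_self
    have h1 : ((List.dedup vs).filter (fun y => !(List.contains (comp ++ [x]) y))).length + 1
        ≤ ((List.dedup vs).filter (fun y => !(List.contains comp y))).length :=
      pv_filter_append_lt vs comp x hx.1 hx.2
    have h2 := ih (comp ++ [x])
      (fun y hy => ⟨(hmem y (List.mem_cons_of_mem _ hy)).1, by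
        intro hc
        rcases List.mem_append.mp hc with h | h
        · exact (hmem y (List.mem_cons_of_mem _ hy)).2 h
        · exact (List.nodup_cons.mp hnd).1 (List.mem_singleton.mp h ▸ hy)⟩)
      (List.nodup_cons.mp hnd).2
    rw [show comp ++ x :: Δ = (comp ++ [x]) ++ Δ by simp]
    simp only [List.length_cons]
    omega

-- one full rescan pass of B (outer for-loop over the snapshot, inner over the neighbours),
-- carrying the 'changed' flag
def pvRound (adj_list : List (Int × List Int)) (vertex_set : List Int)
    (snapshot : List Int) (st0 : List Int × Bool) : List Int × Bool :=
  snapshot.foldl (fun (st : List Int × Bool) u =>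
      ((PySem.Dict.mk adj_list).getD u []).foldl
        (fun (st : List Int × Bool) w =>
          if List.contains vertex_set w && !(List.contains st.1 w) then
            (PySem.Set.add st.1 w, true)
          else st) st) st0

lemma pv_round_inner_eq (vs : List Int) (l : List Int) : ∀ (c : List Int) (ch : Bool),
    l.foldl (fun (st : List Int × Bool) w =>
        if List.contains vs w && !(List.contains st.1 w) then
          (PySem.Set.add st.1 w, true)
        else st) (c, ch)
      = (c ++ pvFresh vs l c, ch || !(pvFresh vs l c).isEmpty) := by
  induction l with
  | nil => intro c ch; simp [pvFresh]
  | cons w l ih =>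
    intro c ch
    by_cases hw : (List.contains vs w && !(List.contains c w)) = true
    · have hwc : w ∉ c := by
        have : w ∈ vs ∧ w ∉ c := by simpa using hw
        exact this.2
      simp only [List.foldl_cons, if_pos hw, pvFresh, PySem.Set.add_of_not_mem hwc]
      rw [ih]
      simp
    · simp only [List.foldl_cons, if_neg hw, pvFresh]
      exact ih c ch

lemma pv_round_eq (adj_list : List (Int × List Int)) (vs : List Int) (f : List Int) :
    ∀ (c : List Int) (ch : Bool),
    pvRound adj_list vs f (c, ch)
      = (c ++ pvFreshAll adj_list vs f c, ch || !(pvFreshAll adj_list vs f c).isEmpty) := by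
  induction f with
  | nil => intro c ch; simp [pvRound, pvFreshAll]
  | cons u f ih =>
    intro c ch
    simp only [pvRound, List.foldl_cons, pvFreshAll]
    rw [show ∀ st0, List.foldl _ st0 f = pvRound adj_list vs f st0 from fun _ => rfl]
    rw [pv_round_inner_eq, ih]
    generalize pvFresh vs ((PySem.Dict.mk adj_list).getD u []) c = a
    cases a <;> simp [List.append_assoc]

-- ===== PORT A =====
-- A's while-loop over (visited, queue); the extra hypothesis hq (every queued node is in
-- vertex_set, true throughout A's run) only serves the termination measure.
def bfsLoopA (adj_list : List (Int × List Int)) (vertex_set : List Int)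
    (visited : PySem.Set Int) (queue : List Int)
    (hq : ∀ x ∈ queue, x ∈ vertex_set) : List Int :=
  match queue with
  | [] => visited
  | u :: q =>
    if hu : u ∈ visited then
      bfsLoopA adj_list vertex_set visited q
        (fun x hx => hq x (List.mem_cons_of_mem _ hx))
    else
      bfsLoopA adj_list vertex_set (PySem.Set.add visited u)
        (((PySem.Dict.mk adj_list).getD u []).foldl
          (fun qq w =>
            if !(List.contains (PySem.Set.add visited u) w) && List.contains vertex_set w then
              qq ++ [w]
            else qq) q)
        (by
          intro x hx
          rcases pv_mem_foldl_append_if _ _ _ _ hx with h | h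
          · exact hq x (List.mem_cons_of_mem _ h)
          · simpa using (Bool.and_elim_right h))
  termination_by
    (((List.dedup vertex_set).filter (fun x => !(List.contains visited x))).length, queue.length)
  decreasing_by
  · exact Prod.Lex.right _ (Nat.lt_succ_self _)
  · apply Prod.Lex.left
    rw [PySem.Set.add_of_not_mem hu]
    exact pv_filter_append_lt _ _ _ (hq u List.mem_cons_self) hu

def bfs_component (adj_list : List (Int × List Int)) (start : Int) (vertex_set : List Int) : List Int :=
  if hs : start ∈ vertex_set then
    bfsLoopA adj_list vertex_set PySem.Set.empty [start]
      (fun x hx => by rwa [List.mem_singleton.mp hx])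
  else PySem.Set.empty

-- ===== PORT B =====
-- B's while-changed loop: one full rescan pass over the snapshot of comp, then repeat iff
-- the pass added something.
def fixLoopB (adj_list : List (Int × List Int)) (vertex_set : List Int)
    (comp : PySem.Set Int) : List Int :=
  let st := pvRound adj_list vertex_set comp (comp, false)
  if h : st.2 = true then fixLoopB adj_list vertex_set st.1 else st.1
  termination_by
    ((List.dedup vertex_set).filter (fun x => !(List.contains comp x))).length
  decreasing_by
    have h2 : (false || !(pvFreshAll adj_list vertex_set comp comp).isEmpty) = true := by
      have h3 : (pvRound adj_list vertex_set comp (comp, false)).2 = true := h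
      rw [pv_round_eq] at h3
      exact h3
    have hΔne : pvFreshAll adj_list vertex_set comp comp ≠ [] := by
      intro hnil
      rw [hnil] at h2
      simp at h2
    have hst1 : (pvRound adj_list vertex_set comp (comp, false)).1
        = comp ++ pvFreshAll adj_list vertex_set comp comp := by rw [pv_round_eq]
    show ((List.dedup vertex_set).filter
          (fun x => !(List.contains ((pvRound adj_list vertex_set comp (comp, false)).1) x))).length
        < ((List.dedup vertex_set).filter (fun x => !(List.contains comp x))).length
    rw [hst1]
    have hle := pv_measure_le vertex_set (pvFreshAll adj_list vertex_set comp comp) comp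
      (pv_freshAll_mem _ _ _ _) (pv_freshAll_nodup _ _ _ _)
    have hpos : 0 < (pvFreshAll adj_list vertex_set comp comp).length :=
      List.length_pos_iff.mpr hΔne
    omega

def bfs_component_alt (adj_list : List (Int × List Int)) (start : Int) (vertex_set : List Int) : List Int :=
  if List.contains vertex_set start then
    fixLoopB adj_list vertex_set (PySem.Set.ofList [start])
  else PySem.Set.empty

-- ===== PRECONDITION & SPEC =====
def Spec_bfs_component (adj_list : List (Int × List Int)) (start : Int) (vertex_set : List Int) (out : List Int) : Prop := out = bfs_component_alt adj_list start vertex_set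
instance (adj_list : List (Int × List Int)) (start : Int) (vertex_set : List Int) (out : List Int) : Decidable (Spec_bfs_component adj_list start vertex_set out) := by unfold Spec_bfs_component; infer_instance

-- ===== CLAIM (what is proved, stated in full; the proofs are below) =====
def Claim_equal_bfs_component : Prop := ∀ (adj_list : List (Int × List Int)) (start : Int) (vertex_set : List Int), Dom_bfs_component adj_list start vertex_set → Spec_bfs_component adj_list start vertex_set (bfs_component adj_list start vertex_set)

-- ===== LEMMAS AND PROOFS =====

-- bridge loop 1: per-node processing like A, mark-on-discovery
def loopC (adj_list : List (Int × List Int)) (vertex_set : List Int)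
    (comp : List Int) (q : List Int) : List Int :=
  match q with
  | [] => comp
  | u :: q' =>
    loopC adj_list vertex_set
      (comp ++ pvFresh vertex_set ((PySem.Dict.mk adj_list).getD u []) comp)
      (q' ++ pvFresh vertex_set ((PySem.Dict.mk adj_list).getD u []) comp)
  termination_by
    ((List.dedup vertex_set).filter (fun x => !(List.contains comp x))).length + q.length
  decreasing_by
    simp only [List.length_append, List.length_cons]
    have h := pv_measure_le vertex_set
      (pvFresh vertex_set ((PySem.Dict.mk adj_list).getD u []) comp) comp
      (pv_fresh_mem _ _ _) (pv_fresh_nodup _ _ _)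
    omega

-- bridge loop 2: level-synchronous frontier expansion
def pvExpand (adj_list : List (Int × List Int)) (vertex_set : List Int)
    (frontier : List Int) (st0 : List Int × List Int) : List Int × List Int :=
  frontier.foldl (fun (st : List Int × List Int) u =>
      ((PySem.Dict.mk adj_list).getD u []).foldl
        (fun (st : List Int × List Int) w =>
          if List.contains vertex_set w && !(List.contains st.1 w) then
            (PySem.Set.add st.1 w, st.2 ++ [w])
          else st) st) st0

lemma pv_foldl_inner_eq (vs : List Int) (l : List Int) : ∀ (c o : List Int),
    l.foldl (fun (st : List Int × List Int) w =>
        if List.contains vs w && !(List.contains st.1 w) then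
          (PySem.Set.add st.1 w, st.2 ++ [w])
        else st) (c, o)
      = (c ++ pvFresh vs l c, o ++ pvFresh vs l c) := by
  induction l with
  | nil => intro c o; simp [pvFresh]
  | cons w l ih =>
    intro c o
    by_cases hw : (List.contains vs w && !(List.contains c w)) = true
    · have hwc : w ∉ c := by
        have : w ∈ vs ∧ w ∉ c := by simpa using hw
        exact this.2
      simp only [List.foldl_cons, if_pos hw, pvFresh, PySem.Set.add_of_not_mem hwc]
      rw [ih]
      simp
    · simp only [List.foldl_cons, if_neg hw, pvFresh]
      exact ih c o

lemma pv_foldl_outer_eq (adj_list : List (Int × List Int)) (vs : List Int) (f : List Int) :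
    ∀ (c o : List Int),
    pvExpand adj_list vs f (c, o)
      = (c ++ pvFreshAll adj_list vs f c, o ++ pvFreshAll adj_list vs f c) := by
  induction f with
  | nil => intro c o; simp [pvExpand, pvFreshAll]
  | cons u f ih =>
    intro c o
    simp only [pvExpand, List.foldl_cons, pvFreshAll]
    rw [show ∀ st0, List.foldl _ st0 f = pvExpand adj_list vs f st0 from fun _ => rfl]
    rw [pv_foldl_inner_eq, ih]
    simp [List.append_assoc]

def pvLevel (adj_list : List (Int × List Int)) (vertex_set : List Int)
    (comp : PySem.Set Int) (frontier : List Int) : List Int :=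
  if _hf : frontier = [] then comp
  else
    let st := pvExpand adj_list vertex_set frontier (comp, [])
    pvLevel adj_list vertex_set st.1 st.2
  termination_by
    ((List.dedup vertex_set).filter (fun x => !(List.contains comp x))).length + frontier.length
  decreasing_by
    simp only [pv_foldl_outer_eq, List.nil_append]
    calc ((List.dedup vertex_set).filter
            (fun x => !(List.contains (comp ++ pvFreshAll adj_list vertex_set frontier comp) x))).length
          + (pvFreshAll adj_list vertex_set frontier comp).length
        ≤ ((List.dedup vertex_set).filter (fun x => !(List.contains comp x))).length :=
          pv_measure_le _ _ _ (pv_freshAll_mem _ _ _ _) (pv_freshAll_nodup _ _ _ _)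
      _ < _ := Nat.lt_add_of_pos_right (List.length_pos_iff.mpr _hf)

-- first occurrences of q that are not in S, in order
def pvDd (S : List Int) : List Int → List Int
  | [] => []
  | u :: q => if u ∈ S then pvDd S q else u :: pvDd (S ++ [u]) q

lemma pv_Dd_append (a : List Int) : ∀ (S b : List Int),
    pvDd S (a ++ b) = pvDd S a ++ pvDd (S ++ pvDd S a) b := by
  induction a with
  | nil => intro S b; simp [pvDd]
  | cons u a ih =>
    intro S b
    by_cases hu : u ∈ S
    · simp only [List.cons_append, pvDd, if_pos hu]
      exact ih S b
    · simp only [List.cons_append, pvDd, if_neg hu]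
      rw [ih (S ++ [u]) b]
      simp [List.append_assoc]

lemma pv_fresh_eq_Dd (vs : List Int) (l : List Int) : ∀ (c : List Int),
    pvFresh vs l c = pvDd c (l.filter (fun w => List.contains vs w)) := by
  induction l with
  | nil => intro c; simp [pvFresh, pvDd]
  | cons w l ih =>
    intro c
    by_cases hv : w ∈ vs
    · by_cases hc : w ∈ c
      · simp [pvFresh, pvDd, hv, hc, ih c]
      · simp [pvFresh, pvDd, hv, hc, ih (c ++ [w])]
    · simp [pvFresh, hv, ih c]

lemma pv_Dd_filter_subset (p : Int → Bool) (l : List Int) : ∀ (T S : List Int),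
    (∀ x ∈ T, x ∈ S) →
    pvDd S (l.filter (fun w => !(List.contains T w) && p w)) = pvDd S (l.filter p) := by
  induction l with
  | nil => intro T S _; simp
  | cons w l ih =>
    intro T S hsub
    have ihh := ih T S hsub
    rw [List.filter_cons, List.filter_cons]
    by_cases hT : w ∈ T
    · have hw : w ∈ S := hsub w hT
      rw [if_neg (by simp [hT] : ¬((!(List.contains T w) && p w) = true))]
      by_cases hp : p w = true
      · rw [if_pos hp]
        simp only [pvDd, if_pos hw]
        exact ihh
      · rw [if_neg hp]
        exact ihh
    · by_cases hp : p w = true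
      · rw [if_pos (by simp [hT, hp]), if_pos hp]
        simp only [pvDd]
        by_cases hS : w ∈ S
        · rw [if_pos hS, if_pos hS]
          exact ihh
        · rw [if_neg hS, if_neg hS]
          exact congrArg _ (ih T (S ++ [w]) (fun x hx => by simp [hsub x hx]))
      · rw [if_neg (by simp [hp]), if_neg hp]
        exact ihh

lemma pv_loopA_eq_loopC (adj_list : List (Int × List Int)) (vertex_set : List Int)
    (visited : List Int) (queue : List Int) (hq : ∀ x ∈ queue, x ∈ vertex_set) :
    bfsLoopA adj_list vertex_set visited queue hq
      = loopC adj_list vertex_set (visited ++ pvDd visited queue) (pvDd visited queue) := by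
  induction visited, queue, hq using bfsLoopA.induct adj_list vertex_set with
  | case1 visited hq _ =>
    rw [bfsLoopA]
    simp [pvDd, loopC]
  | case2 visited u q hq hu _ ih =>
    rw [bfsLoopA]
    simp only [dif_pos hu]
    rw [show pvDd visited (u :: q) = pvDd visited q from by simp [pvDd, hu]]
    exact ih
  | case3 visited u q hq hu _ ih =>
    have hadd : PySem.Set.add visited u = visited ++ [u] := PySem.Set.add_of_not_mem hu
    rw [bfsLoopA]
    simp only [dif_neg hu]
    refine Eq.trans ih ?_
    rw [hadd]
    simp only [dite_eq_ite, PySem.List.foldl_append_if, List.map_id']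
    rw [pv_Dd_append]
    rw [pv_Dd_filter_subset (fun w => List.contains vertex_set w)
      (((PySem.Dict.mk adj_list).getD u [])) (visited ++ [u])
      ((visited ++ [u]) ++ pvDd (visited ++ [u]) q) (fun x hx => by simp at hx ⊢; tauto)]
    rw [← pv_fresh_eq_Dd]
    rw [show pvDd visited (u :: q) = u :: pvDd (visited ++ [u]) q from by simp [pvDd, hu]]
    rw [loopC]
    simp [List.append_assoc]

lemma pv_loopC_append (adj_list : List (Int × List Int)) (vs : List Int) (f : List Int) :
    ∀ (comp acc : List Int),
    loopC adj_list vs comp (f ++ acc)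
      = loopC adj_list vs (comp ++ pvFreshAll adj_list vs f comp)
          (acc ++ pvFreshAll adj_list vs f comp) := by
  induction f with
  | nil => intro comp acc; simp [pvFreshAll]
  | cons u f ih =>
    intro comp acc
    rw [List.cons_append, loopC, List.append_assoc]
    rw [ih]
    simp [pvFreshAll, List.append_assoc]

lemma pv_loopC_eq_level (adj_list : List (Int × List Int)) (vs : List Int)
    (comp : List Int) (f : List Int) :
    loopC adj_list vs comp f = pvLevel adj_list vs comp f := by
  induction comp, f using pvLevel.induct adj_list vs with
  | case1 comp => rw [pvLevel]; simp [loopC]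
  | case2 comp frontier hf st ih =>
    have hst : st = (comp ++ pvFreshAll adj_list vs frontier comp,
        pvFreshAll adj_list vs frontier comp) := by
      show pvExpand adj_list vs frontier (comp, []) = _
      rw [pv_foldl_outer_eq]
      simp
    rw [hst] at ih
    rw [pvLevel, dif_neg hf]
    show loopC adj_list vs comp frontier = pvLevel adj_list vs st.1 st.2
    rw [hst]
    have h2 := pv_loopC_append adj_list vs frontier comp []
    simp only [List.append_nil, List.nil_append] at h2
    rw [h2]
    exact ih

-- nothing fresh comes from a node all of whose allowed neighbours are already in
lemma pv_fresh_nil (vs : List Int) (l : List Int) : ∀ (c : List Int),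
    (∀ w ∈ l, w ∈ vs → w ∈ c) → pvFresh vs l c = [] := by
  induction l with
  | nil => intro c _; simp [pvFresh]
  | cons w l ih =>
    intro c hcl
    have hcond : ¬((List.contains vs w && !(List.contains c w)) = true) := by
      simp only [Bool.and_eq_true, List.contains_eq_mem, decide_eq_true_eq,
        Bool.not_eq_eq_eq_not, Bool.not_true, decide_eq_false_iff_not, not_and]
      intro hv
      simp [hcl w List.mem_cons_self hv]
    unfold pvFresh
    rw [if_neg hcond]
    exact ih c (fun w' hw' => hcl w' (List.mem_cons_of_mem _ hw'))

-- scanning already-saturated nodes first contributes nothing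
lemma pv_freshAll_skip (adj_list : List (Int × List Int)) (vs : List Int) (d : List Int) :
    ∀ (f c : List Int),
    (∀ u ∈ d, ∀ w ∈ (PySem.Dict.mk adj_list).getD u [], w ∈ vs → w ∈ c) →
    pvFreshAll adj_list vs (d ++ f) c = pvFreshAll adj_list vs f c := by
  induction d with
  | nil => intro f c _; simp
  | cons u d ih =>
    intro f c hcl
    have h0 : pvFresh vs ((PySem.Dict.mk adj_list).getD u []) c = [] :=
      pv_fresh_nil _ _ _ (hcl u List.mem_cons_self)
    rw [List.cons_append,
      show pvFreshAll adj_list vs (u :: (d ++ f)) c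
          = pvFresh vs ((PySem.Dict.mk adj_list).getD u []) c
            ++ pvFreshAll adj_list vs (d ++ f)
                 (c ++ pvFresh vs ((PySem.Dict.mk adj_list).getD u []) c) from rfl,
      h0]
    simp only [List.nil_append, List.append_nil]
    exact ih f c (fun u' hu' => hcl u' (List.mem_cons_of_mem _ hu'))

lemma pv_fresh_closure (vs : List Int) (l : List Int) : ∀ (c : List Int) (w : Int),
    w ∈ l → w ∈ vs → w ∈ c ++ pvFresh vs l c := by
  induction l with
  | nil => intro c w h; simp at h
  | cons x l ih =>
    intro c w hw hv
    by_cases hcond : (List.contains vs x && !(List.contains c x)) = true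
    · have hxc : x ∉ c := by
        have : x ∈ vs ∧ x ∉ c := by simpa using hcond
        exact this.2
      unfold pvFresh
      rw [if_pos hcond]
      rcases List.mem_cons.mp hw with rfl | hw'
      · simp
      · have := ih (c ++ [x]) w hw' hv
        simp only [List.mem_append, List.mem_cons] at this ⊢
        tauto
    · unfold pvFresh
      rw [if_neg hcond]
      rcases List.mem_cons.mp hw with rfl | hw'
      · have hwc : w ∈ c := by
          simp only [Bool.and_eq_true, List.contains_eq_mem, decide_eq_true_eq,
            Bool.not_eq_eq_eq_not, Bool.not_true, decide_eq_false_iff_not, not_and,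
            Decidable.not_not] at hcond
          exact hcond hv
        simp [hwc]
      · exact ih c w hw' hv

-- after scanning f, every allowed neighbour of f is in comp ++ freshAll
lemma pv_closure (adj_list : List (Int × List Int)) (vs : List Int) (f : List Int) :
    ∀ (c : List Int) (u w : Int), u ∈ f → w ∈ (PySem.Dict.mk adj_list).getD u [] → w ∈ vs →
    w ∈ c ++ pvFreshAll adj_list vs f c := by
  induction f with
  | nil => intro c u w h; simp at h
  | cons x f ih =>
    intro c u w hu hw hv
    unfold pvFreshAll
    rcases List.mem_cons.mp hu with rfl | hu'
    · have := pv_fresh_closure vs ((PySem.Dict.mk adj_list).getD u []) c w hw hv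
      simp only [List.mem_append] at this ⊢
      tauto
    · have := ih (c ++ pvFresh vs ((PySem.Dict.mk adj_list).getD x []) c) u w hu' hw hv
      simp only [List.mem_append] at this ⊢
      tauto

-- the fixpoint loop agrees with the level loop whenever comp = d ++ f with d saturated
lemma pv_fix_eq_level (adj_list : List (Int × List Int)) (vs : List Int) (comp : List Int) :
    ∀ (d f : List Int), comp = d ++ f →
    (∀ u ∈ d, ∀ w ∈ (PySem.Dict.mk adj_list).getD u [], w ∈ vs → w ∈ comp) →
    fixLoopB adj_list vs comp = pvLevel adj_list vs comp f := by
  induction comp using fixLoopB.induct adj_list vs with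
  | case1 comp st h ih =>
    intro d f hdf hcl
    have hst1 : (pvRound adj_list vs comp (comp, false)).1
        = comp ++ pvFreshAll adj_list vs comp comp := by rw [pv_round_eq]
    have hst2 : (pvRound adj_list vs comp (comp, false)).2
        = (false || !(pvFreshAll adj_list vs comp comp).isEmpty) := by rw [pv_round_eq]
    have h' : (pvRound adj_list vs comp (comp, false)).2 = true := h
    rw [hst2] at h'
    have hΔ : pvFreshAll adj_list vs comp comp = pvFreshAll adj_list vs f comp := by
      rw [hdf]
      exact pv_freshAll_skip adj_list vs d f (d ++ f) (hdf ▸ hcl)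
    have hΔne : pvFreshAll adj_list vs comp comp ≠ [] := by
      intro hnil
      rw [hnil] at h'
      simp at h'
    have hfne : f ≠ [] := by
      intro hfnil
      apply hΔne
      rw [hΔ, hfnil]
      rfl
    have hrhs : pvLevel adj_list vs comp f
        = pvLevel adj_list vs (comp ++ pvFreshAll adj_list vs f comp)
            (pvFreshAll adj_list vs f comp) := by
      rw [pvLevel, dif_neg hfne]
      have hexp : pvExpand adj_list vs f (comp, [])
          = (comp ++ pvFreshAll adj_list vs f comp, pvFreshAll adj_list vs f comp) := by
        rw [pv_foldl_outer_eq]; simp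
      simp only [hexp]
    have hsat : ∀ u ∈ comp, ∀ w ∈ (PySem.Dict.mk adj_list).getD u [], w ∈ vs →
        w ∈ comp ++ pvFreshAll adj_list vs comp comp := by
      intro u hu w hw hv
      rw [hΔ]
      rw [hdf] at hu
      rcases List.mem_append.mp hu with hud | huf
      · have := hcl u hud w hw hv
        simp only [List.mem_append] at this ⊢
        tauto
      · exact pv_closure adj_list vs f comp u w huf hw hv
    rw [fixLoopB]
    rw [dif_pos (show (pvRound adj_list vs comp (comp, false)).2 = true from h)]
    rw [hrhs, ← hΔ]
    have hmain := ih comp (pvFreshAll adj_list vs comp comp) (by exact hst1) (by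
      rw [show (st.1 : List Int) = comp ++ pvFreshAll adj_list vs comp comp from hst1]
      exact hsat)
    rw [hst1]
    have hstlet : (st.1 : List Int) = comp ++ pvFreshAll adj_list vs comp comp := hst1
    rw [hstlet] at hmain
    exact hmain
  | case2 comp st h =>
    intro d f hdf hcl
    have hst1 : (pvRound adj_list vs comp (comp, false)).1
        = comp ++ pvFreshAll adj_list vs comp comp := by rw [pv_round_eq]
    have hst2 : (pvRound adj_list vs comp (comp, false)).2
        = (false || !(pvFreshAll adj_list vs comp comp).isEmpty) := by rw [pv_round_eq]
    have h' : ¬ (pvRound adj_list vs comp (comp, false)).2 = true := h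
    rw [hst2] at h'
    have hΔnil : pvFreshAll adj_list vs comp comp = [] := by
      simp only [Bool.false_or, Bool.not_eq_eq_eq_not, Bool.not_true] at h'
      have : (pvFreshAll adj_list vs comp comp).isEmpty = true := by
        cases hcase : (pvFreshAll adj_list vs comp comp).isEmpty
        · exact absurd (by simp [hcase]) h'
        · rfl
      simpa [List.isEmpty_iff] using this
    have hΔf : pvFreshAll adj_list vs f comp = [] := by
      rw [← hΔnil, hdf]
      exact (pv_freshAll_skip adj_list vs d f (d ++ f) (hdf ▸ hcl)).symm
    rw [fixLoopB]
    rw [dif_neg (show ¬ (pvRound adj_list vs comp (comp, false)).2 = true from h)]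
    rw [hst1, hΔnil, List.append_nil]
    by_cases hfnil : f = []
    · rw [pvLevel, dif_pos hfnil]
    · rw [pvLevel, dif_neg hfnil]
      have hexp : pvExpand adj_list vs f (comp, []) = (comp, []) := by
        rw [pv_foldl_outer_eq, hΔf]; simp
      simp only [hexp]
      rw [pvLevel]
      simp

-- ===== VERDICT (by name: the statement is the Claim_ definition above) =====
theorem bfs_component_spec : Claim_equal_bfs_component := by
  intro adj_list start vertex_set _
  unfold Spec_bfs_component bfs_component bfs_component_alt
  by_cases hs : start ∈ vertex_set
  · rw [dif_pos hs, if_pos (by simpa using hs)]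
    rw [pv_loopA_eq_loopC]
    have h1 : pvDd PySem.Set.empty [start] = [start] := by simp [pvDd, PySem.Set.empty]
    rw [h1, pv_loopC_eq_level]
    have h2 : (PySem.Set.ofList [start] : List Int) = [start] := rfl
    rw [h2]
    have h3 : PySem.Set.empty ++ [start] = [start] := rfl
    rw [h3]
    exact (pv_fix_eq_level adj_list vertex_set [start] [] [start] rfl
      (by intro u hu; simp at hu)).symm
  · rw [dif_neg hs, if_neg (by simpa using hs)]
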